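-- pv_equiv track=rewrite | github.com/thanhtunguet/xkey | .github/scripts/generate_appcast.py | find_dmg_asset
-- ===== SOURCE A (Python) =====
-- from typing import Dict, List, Optional
--
-- def find_dmg_asset(assets: List[Dict]) -> Optional[Dict]:
--     """Find the main DMG file in release assets"""
--     # Look for XKey.dmg first
--     for asset in assets:
--         if asset['name'] == 'XKey.dmg':
--             return asset
--
--     # Fallback to any .dmg file
--     for asset in assets:
--         if asset['name'].endswith('.dmg') and 'IM' not in asset['name']:
--             return asset
--
--     return None
-- ===== SOURCE B (Python) =====
-- def find_dmg_asset(assets):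
--     """Find the main DMG file in release assets (single pass with fallback)."""
--     fallback = None
--     for asset in assets:
--         name = asset['name']
--         if name == 'XKey.dmg':
--             return asset
--         if fallback is None and name.endswith('.dmg') and 'IM' not in name:
--             fallback = asset
--     return fallback
-- ===== Notes on version B (the rewrite author's own statement) =====
-- stated objective: simpler
-- what changed: Replaces A's two sequential scans with a single pass that returns on an exact 'XKey.dmg' match and records the first qualifying .dmg asset as a fallback.
import Mathlib
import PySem

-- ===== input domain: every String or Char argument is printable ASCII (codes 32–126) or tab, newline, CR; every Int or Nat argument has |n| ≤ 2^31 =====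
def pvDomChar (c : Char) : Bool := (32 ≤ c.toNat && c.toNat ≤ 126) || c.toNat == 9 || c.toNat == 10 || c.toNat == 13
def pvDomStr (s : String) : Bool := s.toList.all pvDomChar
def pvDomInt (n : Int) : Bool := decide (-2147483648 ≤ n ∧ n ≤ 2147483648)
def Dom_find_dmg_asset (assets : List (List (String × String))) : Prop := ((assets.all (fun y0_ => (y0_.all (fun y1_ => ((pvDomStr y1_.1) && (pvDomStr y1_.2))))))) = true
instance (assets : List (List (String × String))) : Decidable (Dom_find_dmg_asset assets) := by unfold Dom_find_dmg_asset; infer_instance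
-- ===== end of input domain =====

-- B collapses A's two scans into a single pass with a first-hit fallback (objective: simpler).
-- Pre_ excludes inputs where a 'name'-less asset occurs before any XKey.dmg match, where Python A raises KeyError.


-- ===== PORT A =====
-- asset['name']; total form (getD) is used only under Pre_ (every asset contains the key "name")
def pvNameOf (asset : List (String × String)) : String :=
  (PySem.Dict.ofList asset).getD "name" ""

-- first loop of A: look for the exact name 'XKey.dmg'
def pvLoop1 : List (List (String × String)) → Option (List (String × String))
  | [] => none
  | a :: rest => if pvNameOf a == "XKey.dmg" then some a else pvLoop1 rest

-- second loop of A: fallback to any .dmg file without 'IM'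
def pvLoop2 : List (List (String × String)) → Option (List (String × String))
  | [] => none
  | a :: rest =>
      if PySem.Str.endswith (pvNameOf a) ".dmg" && !(PySem.Str.isIn "IM" (pvNameOf a)) then
        some a
      else pvLoop2 rest

def find_dmg_asset (assets : List (List (String × String))) : Option (List (String × String)) :=
  match pvLoop1 assets with
  | some a => some a
  | none => pvLoop2 assets

-- ===== PORT B =====
-- single pass over assets, carrying the fallback (None until the first qualifying .dmg)
def pvAltLoop : List (List (String × String)) → Option (List (String × String)) → Option (List (String × String))
  | [], fallback => fallback
  | a :: rest, fallback =>
      let name := pvNameOf a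
      if name == "XKey.dmg" then some a
      else if fallback.isNone && PySem.Str.endswith name ".dmg" && !(PySem.Str.isIn "IM" name) then
        pvAltLoop rest (some a)
      else pvAltLoop rest fallback

def find_dmg_asset_alt (assets : List (List (String × String))) : Option (List (String × String)) :=
  pvAltLoop assets none

-- ===== PRECONDITION & SPEC =====
-- Pre_ excludes exactly the inputs where the Python raises KeyError: an asset lacking the
-- key "name" that occurs before any asset named "XKey.dmg" (later assets are never reached).
def Pre_find_dmg_asset (assets : List (List (String × String))) : Prop :=
  ∀ a ∈ assets.takeWhile (fun a => !((PySem.Dict.ofList a).get? "name" == some "XKey.dmg")),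
    (PySem.Dict.ofList a).contains "name" = true
instance (assets : List (List (String × String))) : Decidable (Pre_find_dmg_asset assets) := by
  unfold Pre_find_dmg_asset; infer_instance
def pvWitness_find_dmg_asset : (List (List (String × String))) :=
  [[("name", "XKey.dmg")], [("name", "other.dmg"), ("url", "u")]]
def Spec_find_dmg_asset (assets : List (List (String × String))) (out : Option (List (String × String))) : Prop := out = find_dmg_asset_alt assets
instance (assets : List (List (String × String))) (out : Option (List (String × String))) : Decidable (Spec_find_dmg_asset assets out) := by unfold Spec_find_dmg_asset; infer_instance

-- ===== CLAIM (what is proved, stated in full; the proofs are below) =====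
def Claim_equal_find_dmg_asset : Prop := ∀ (assets : List (List (String × String))), Dom_find_dmg_asset assets → Pre_find_dmg_asset assets → Spec_find_dmg_asset assets (find_dmg_asset assets)

-- ===== LEMMAS AND PROOFS =====

-- loop invariant of B's single pass: an exact match anywhere wins; otherwise the carried
-- fallback (set from an earlier element) beats any qualifier in the rest of the list
theorem pvAltLoop_eq (assets : List (List (String × String)))
    (fb : Option (List (String × String))) :
    pvAltLoop assets fb =
      match pvLoop1 assets with
      | some a => some a
      | none => fb.or (pvLoop2 assets) := by
  induction assets generalizing fb with
  | nil => cases fb <;> simp [pvAltLoop, pvLoop1, pvLoop2]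
  | cons a rest ih =>
    by_cases hx : pvNameOf a == "XKey.dmg"
    · simp [pvAltLoop, pvLoop1, hx]
    · by_cases hq : (PySem.Chars.endswith (pvNameOf a).toList ['.', 'd', 'm', 'g'] = true ∧
          PySem.Chars.isIn ['I', 'M'] (pvNameOf a).toList = false)
      · cases fb with
        | none => simp [pvAltLoop, pvLoop1, pvLoop2, hx, hq, ih]
        | some x =>
          simp only [pvAltLoop, pvLoop1, pvLoop2, hx, Bool.false_and,
            Option.isNone_some, ih]
          cases pvLoop1 rest <;> simp
      · cases fb <;>
          simp [pvAltLoop, pvLoop1, pvLoop2, hx, hq, ih]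

-- ===== VERDICT (by name: the statement is the Claim_ definition above) =====
theorem find_dmg_asset_spec : Claim_equal_find_dmg_asset := by
  intro assets _ _
  unfold Spec_find_dmg_asset find_dmg_asset find_dmg_asset_alt
  rw [pvAltLoop_eq]
  cases pvLoop1 assets <;> simp
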